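-- pv_equiv track=rewrite | github.com/adi2809/euler-trail-builder | backend/app.py | _mixed_connectivity_ok
-- ===== SOURCE A (Python) =====
-- from collections import defaultdict, deque
-- from typing import List, Tuple, Optional, Set, Dict
--
-- def _mixed_connectivity_ok(nodes: Set[str], edges: List[dict]) -> bool:
--     """Check if all non-isolated vertices are connected in a mixed graph."""
--     # Build adjacency list treating all edges as undirected for connectivity
--     adj = defaultdict(set)
--     vertices_with_edges = set()
--
--     for edge in edges:
--         u, v = edge['source'], edge['target']
--         adj[u].add(v)
--         adj[v].add(u)
--         vertices_with_edges.add(u)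
--         vertices_with_edges.add(v)
--
--     if not vertices_with_edges:
--         return True
--
--     # BFS to check connectivity
--     start = next(iter(vertices_with_edges))
--     visited = {start}
--     queue = deque([start])
--
--     while queue:
--         node = queue.popleft()
--         for neighbor in adj[node]:
--             if neighbor not in visited:
--                 visited.add(neighbor)
--                 queue.append(neighbor)
--
--     return visited == vertices_with_edges
-- ===== SOURCE B (Python) =====
-- def _mixed_connectivity_ok(nodes, edges):
--     """Check if all non-isolated vertices are connected in a mixed graph.
--
--     Bellman-Ford-style label propagation: no adjacency structure and no queue;
--     repeat |V| relaxation passes over the raw edge list, growing a reached set.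
--     """
--     pairs = [(e['source'], e['target']) for e in edges]
--     verts = []
--     seen = set()
--     for u, v in pairs:
--         for w in (u, v):
--             if w not in seen:
--                 seen.add(w)
--                 verts.append(w)
--     if not verts:
--         return True
--     reached = {verts[0]}
--     for _ in range(len(verts)):
--         for u, v in pairs:
--             if u in reached:
--                 reached.add(v)
--             if v in reached:
--                 reached.add(u)
--     return len(reached) == len(verts)
-- ===== Notes on version B (the rewrite author's own statement) =====
-- stated objective: alternative
-- what changed: Replaces A's adjacency-dict construction plus BFS with an explicit queue by Bellman-Ford-style label propagation: |V| relaxation passes directly over the raw edge list growing a reached set, then a cardinality comparison instead of set equality.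
import Mathlib
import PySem

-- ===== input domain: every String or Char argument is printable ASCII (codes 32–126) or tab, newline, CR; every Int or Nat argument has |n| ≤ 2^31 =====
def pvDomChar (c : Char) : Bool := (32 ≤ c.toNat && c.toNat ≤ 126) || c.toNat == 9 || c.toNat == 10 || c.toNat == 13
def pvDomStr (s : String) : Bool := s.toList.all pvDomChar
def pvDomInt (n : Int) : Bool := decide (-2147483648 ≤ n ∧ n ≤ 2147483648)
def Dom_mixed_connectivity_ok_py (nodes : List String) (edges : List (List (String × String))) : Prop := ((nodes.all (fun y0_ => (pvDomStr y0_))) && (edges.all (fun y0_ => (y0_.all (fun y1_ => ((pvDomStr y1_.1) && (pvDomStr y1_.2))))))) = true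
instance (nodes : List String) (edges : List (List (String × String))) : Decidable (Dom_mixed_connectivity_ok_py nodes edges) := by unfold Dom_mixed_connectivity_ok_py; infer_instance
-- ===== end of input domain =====

-- B replaces A's adjacency-dict + BFS queue by |V| label-propagation passes over the raw edge list (alternative algorithm, no speed claim).

-- shared helper: edge['source'] / edge['target'] first-match association-list lookup (total via getD "" only under Pre_, key present)
def pvLookup (e : List (String × String)) (k : String) : Option String :=
  (e.find? (fun p => p.1 == k)).map (fun p => p.2)

-- ===== PORT A =====
def pvAdjStep (st : PySem.Dict String (PySem.Set String) × PySem.Set String)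
    (edge : List (String × String)) :
    PySem.Dict String (PySem.Set String) × PySem.Set String :=
  let u := (pvLookup edge "source").getD ""
  let v := (pvLookup edge "target").getD ""
  (((st.1.modify u PySem.Set.empty (fun s => s.add v)).modify v PySem.Set.empty (fun s => s.add u)),
   ((st.2.add u).add v))

-- body of A's BFS inner for-loop over the neighbours of the dequeued node
def pvInnerStep (st : PySem.Set String × List String) (neighbor : String) :
    PySem.Set String × List String :=
  if st.1.contains neighbor then st else (st.1.add neighbor, st.2 ++ [neighbor])

-- A's BFS while-loop; the fuel argument is only a totality guard (the proof shows it never runs out)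
def pvBfs (adj : PySem.Dict String (PySem.Set String)) :
    Nat → PySem.Set String → List String → PySem.Set String
  | 0, visited, _ => visited
  | _ + 1, visited, [] => visited
  | fuel + 1, visited, node :: queue =>
    let st := (adj.getD node PySem.Set.empty).foldl pvInnerStep (visited, queue)
    pvBfs adj fuel st.1 st.2

def mixed_connectivity_ok_py (nodes : List String) (edges : List (List (String × String))) : Bool :=
  let st := edges.foldl pvAdjStep (PySem.Dict.empty, PySem.Set.empty)
  match st.2 with
  | [] => true
  | start :: rest =>
    PySem.Set.equal
      (pvBfs st.1 (1 + 2 * (start :: rest).length) (PySem.Set.ofList [start]) [start])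
      (start :: rest)

-- ===== PORT B =====
-- pairs = [(e['source'], e['target']) for e in edges]
def pvPairs (edges : List (List (String × String))) : List (String × String) :=
  edges.map (fun e => ((pvLookup e "source").getD "", (pvLookup e "target").getD ""))

-- one relaxation of a single edge: if u in reached: reached.add(v); if v in reached: reached.add(u)
def pvPassStep (r : PySem.Set String) (p : String × String) : PySem.Set String :=
  let r1 := if r.contains p.1 then r.add p.2 else r
  if r1.contains p.2 then r1.add p.1 else r1

def mixed_connectivity_ok_py_alt (nodes : List String) (edges : List (List (String × String))) : Bool :=
  let pairs := pvPairs edges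
  let verts := pairs.foldl (fun (s : PySem.Set String) p => (s.add p.1).add p.2) PySem.Set.empty
  match verts with
  | [] => true
  | v0 :: rest =>
    let n := (v0 :: rest).length
    let reached := (List.range n).foldl (fun r _ => pairs.foldl pvPassStep r) (PySem.Set.ofList [v0])
    reached.length == n

-- ===== PRECONDITION & SPEC =====
-- Pre_ excludes exactly the edge dicts missing a 'source' or 'target' key, on which Python A raises KeyError.
def Pre_mixed_connectivity_ok_py (nodes : List String) (edges : List (List (String × String))) : Prop :=
  ∀ e ∈ edges, (e.find? (fun p => p.1 == "source")).isSome ∧ (e.find? (fun p => p.1 == "target")).isSome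
instance (nodes : List String) (edges : List (List (String × String))) : Decidable (Pre_mixed_connectivity_ok_py nodes edges) := by unfold Pre_mixed_connectivity_ok_py; infer_instance
def pvWitness_mixed_connectivity_ok_py : List String × (List (List (String × String))) :=
  (["a", "b"], [[("source", "a"), ("target", "b")]])

def Spec_mixed_connectivity_ok_py (nodes : List String) (edges : List (List (String × String))) (out : Bool) : Prop := out = mixed_connectivity_ok_py_alt nodes edges
instance (nodes : List String) (edges : List (List (String × String))) (out : Bool) : Decidable (Spec_mixed_connectivity_ok_py nodes edges out) := by unfold Spec_mixed_connectivity_ok_py; infer_instance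

-- ===== CLAIM (what is proved, stated in full; the proofs are below) =====
def Claim_equal_mixed_connectivity_ok_py : Prop := ∀ (nodes : List String) (edges : List (List (String × String))), Dom_mixed_connectivity_ok_py nodes edges → Pre_mixed_connectivity_ok_py nodes edges → Spec_mixed_connectivity_ok_py nodes edges (mixed_connectivity_ok_py nodes edges)

-- ===== LEMMAS AND PROOFS =====

-- the undirected edge relation and reachability: the common specification both traversals compute
def pvAdjRel (P : List (String × String)) (x y : String) : Prop := (x, y) ∈ P ∨ (y, x) ∈ P

inductive pvReach (P : List (String × String)) (s : String) : String → Prop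
  | refl : pvReach P s s
  | step {u v : String} : pvReach P s u → pvAdjRel P u v → pvReach P s v

theorem pv_mem_contains (s : PySem.Set String) (a : String) : s.contains a = true ↔ a ∈ s := by
  simp [PySem.Set.contains]

theorem pvBoolEq {a b : Bool} (h : a = true ↔ b = true) : a = b := by
  cases a <;> cases b <;> simp_all

-- generic nodup/cardinality helpers
theorem pvLenLe {l1 l2 : List String} (h1 : l1.Nodup) (hs : l1 ⊆ l2) (h2 : l2.Nodup) :
    l1.length ≤ l2.length := by
  have hsub : l1.toFinset ⊆ l2.toFinset := by
    intro a ha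
    rw [List.mem_toFinset] at *
    exact hs ha
  have hc := Finset.card_le_card hsub
  rwa [List.toFinset_card_of_nodup h1, List.toFinset_card_of_nodup h2] at hc

theorem pvSubsetFull {l1 l2 : List String} (hs : l1 ⊆ l2) (h1 : l1.Nodup) (h2 : l2.Nodup)
    (hl : l2.length ≤ l1.length) : ∀ x ∈ l2, x ∈ l1 := by
  have hsub : l1.toFinset ⊆ l2.toFinset := by
    intro a ha
    rw [List.mem_toFinset] at *
    exact hs ha
  have hcard : l2.toFinset.card ≤ l1.toFinset.card := by
    rwa [List.toFinset_card_of_nodup h1, List.toFinset_card_of_nodup h2]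
  have heq := Finset.eq_of_subset_of_card_le hsub hcard
  intro x hx
  have : x ∈ l1.toFinset := heq ▸ List.mem_toFinset.2 hx
  exact List.mem_toFinset.1 this

-- the shared vertex-collection fold
theorem pv_mem_vertsFold (P : List (String × String)) (s : PySem.Set String) (x : String) :
    x ∈ P.foldl (fun (s : PySem.Set String) p => (s.add p.1).add p.2) s ↔
      x ∈ s ∨ ∃ p ∈ P, x = p.1 ∨ x = p.2 := by
  induction P generalizing s with
  | nil => simp
  | cons p P ih =>
    simp only [List.foldl_cons, ih, PySem.Set.mem_add, List.mem_cons]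
    constructor
    · rintro (((h | h) | h) | ⟨q, hq, hx⟩)
      · exact Or.inl h
      · exact Or.inr ⟨p, Or.inl rfl, Or.inl h⟩
      · exact Or.inr ⟨p, Or.inl rfl, Or.inr h⟩
      · exact Or.inr ⟨q, Or.inr hq, hx⟩
    · rintro (h | ⟨q, (hq | hq), hx⟩)
      · exact Or.inl (Or.inl (Or.inl h))
      · subst hq
        rcases hx with h | h
        · exact Or.inl (Or.inl (Or.inr h))
        · exact Or.inl (Or.inr h)
      · exact Or.inr ⟨q, hq, hx⟩

theorem pv_nodup_vertsFold (P : List (String × String)) (s : PySem.Set String) (h : s.Nodup) :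
    (P.foldl (fun (s : PySem.Set String) p => (s.add p.1).add p.2) s).Nodup := by
  induction P generalizing s with
  | nil => exact h
  | cons p P ih =>
    exact ih _ (PySem.Set.nodup_add _ _ (PySem.Set.nodup_add _ _ h))

-- A's single fold splits: the second component is the shared vertex fold over pvPairs
theorem pv_adjFold_snd (edges : List (List (String × String)))
    (d : PySem.Dict String (PySem.Set String)) (w : PySem.Set String) :
    (edges.foldl pvAdjStep (d, w)).2 =
      (pvPairs edges).foldl (fun (s : PySem.Set String) p => (s.add p.1).add p.2) w := by
  induction edges generalizing d w with
  | nil => rfl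
  | cons e es ih =>
    simp only [List.foldl_cons, pvPairs, List.map_cons]
    exact ih _ _

-- A's adjacency dict realises exactly the symmetric edge relation
theorem pv_adjFold_fst_mem (edges : List (List (String × String)))
    (d : PySem.Dict String (PySem.Set String)) (w : PySem.Set String) (x y : String) :
    y ∈ (edges.foldl pvAdjStep (d, w)).1.getD x PySem.Set.empty ↔
      y ∈ d.getD x PySem.Set.empty ∨ pvAdjRel (pvPairs edges) x y := by
  induction edges generalizing d w with
  | nil => simp [pvPairs, pvAdjRel]
  | cons e es ih =>
    simp only [List.foldl_cons]
    rw [ih]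
    have hg : ∀ (k : String) (f : PySem.Set String → PySem.Set String)
        (dd : PySem.Dict String (PySem.Set String)) (z : String),
        (dd.modify k PySem.Set.empty f).getD z PySem.Set.empty =
          if z = k then f (dd.getD k PySem.Set.empty) else dd.getD z PySem.Set.empty := by
      intro k f dd z
      simp [PySem.Dict.modify, PySem.Dict.getD_insert]
    set u := (pvLookup e "source").getD "" with hu
    set v := (pvLookup e "target").getD "" with hv
    have hrel : ∀ z : String, pvAdjRel (pvPairs (e :: es)) x z ↔
        ((x = u ∧ z = v) ∨ (x = v ∧ z = u)) ∨ pvAdjRel (pvPairs es) x z := by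
      intro z
      simp only [pvPairs, List.map_cons, pvAdjRel, List.mem_cons, Prod.mk.injEq, ← hu, ← hv]
      tauto
    rw [hrel]
    show y ∈ (pvAdjStep (d, w) e).1.getD x PySem.Set.empty ∨ _ ↔ _
    have hstep : (pvAdjStep (d, w) e).1 =
        (d.modify u PySem.Set.empty (fun s => s.add v)).modify v PySem.Set.empty (fun s => s.add u) := rfl
    have hgm : ∀ (k a z yy : String) (dd : PySem.Dict String (PySem.Set String)),
        yy ∈ (dd.modify k PySem.Set.empty (fun s => s.add a)).getD z PySem.Set.empty ↔
          yy ∈ dd.getD z PySem.Set.empty ∨ (z = k ∧ yy = a) := by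
      intro k a z yy dd
      rw [hg]
      by_cases hzk : z = k
      · simp [hzk, PySem.Set.mem_add]
      · simp [hzk]
    rw [hstep, hgm, hgm]
    tauto

-- the inner neighbour fold of one BFS iteration
theorem pv_bfsInner (ns : List String) (s : PySem.Set String) (q : List String) (hs : s.Nodup) :
    (∀ x, x ∈ (ns.foldl pvInnerStep (s, q)).1 ↔ x ∈ s ∨ x ∈ ns) ∧
    (ns.foldl pvInnerStep (s, q)).1.Nodup ∧
    (∀ x ∈ (ns.foldl pvInnerStep (s, q)).2, x ∈ q ∨ x ∈ ns) ∧
    (∀ x ∈ q, x ∈ (ns.foldl pvInnerStep (s, q)).2) ∧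
    (∀ x, x ∈ (ns.foldl pvInnerStep (s, q)).1 → x ∉ s → x ∈ (ns.foldl pvInnerStep (s, q)).2) ∧
    (ns.foldl pvInnerStep (s, q)).1.length + q.length = s.length + (ns.foldl pvInnerStep (s, q)).2.length := by
  induction ns generalizing s q with
  | nil =>
    exact ⟨fun x => by simp, hs, fun x hx => Or.inl hx, fun x hx => hx,
      fun x hx hnx => absurd hx hnx, rfl⟩
  | cons n ns ih =>
    simp only [List.foldl_cons, pvInnerStep]
    by_cases hn : n ∈ s
    · rw [if_pos ((pv_mem_contains s n).2 hn)]
      obtain ⟨h1, h2, h3, h4, h5, h6⟩ := ih s q hs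
      refine ⟨?_, h2, ?_, h4, h5, h6⟩
      · intro x
        rw [h1 x]
        constructor
        · rintro (h | h)
          · exact Or.inl h
          · exact Or.inr (List.mem_cons_of_mem _ h)
        · rintro (h | h)
          · exact Or.inl h
          · rcases List.mem_cons.1 h with h | h
            · exact Or.inl (h ▸ hn)
            · exact Or.inr h
      · intro x hx
        rcases h3 x hx with h | h
        · exact Or.inl h
        · exact Or.inr (List.mem_cons_of_mem _ h)
    · have hnc : ¬s.contains n = true := fun hc => hn ((pv_mem_contains s n).1 hc)
      rw [if_neg hnc]
      have hadd : s.add n = s ++ [n] := by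
        simp [PySem.Set.add, hn]
      obtain ⟨h1, h2, h3, h4, h5, h6⟩ := ih (s.add n) (q ++ [n]) (PySem.Set.nodup_add _ _ hs)
      refine ⟨?_, h2, ?_, ?_, ?_, ?_⟩
      · intro x
        rw [h1 x, PySem.Set.mem_add]
        constructor
        · rintro ((h | h) | h)
          · exact Or.inl h
          · exact Or.inr (h ▸ List.mem_cons_self)
          · exact Or.inr (List.mem_cons_of_mem _ h)
        · rintro (h | h)
          · exact Or.inl (Or.inl h)
          · rcases List.mem_cons.1 h with h | h
            · exact Or.inl (Or.inr h)
            · exact Or.inr h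
      · intro x hx
        rcases h3 x hx with h | h
        · rcases List.mem_append.1 h with h | h
          · exact Or.inl h
          · exact Or.inr (List.mem_singleton.1 h ▸ List.mem_cons_self)
        · exact Or.inr (List.mem_cons_of_mem _ h)
      · intro x hx
        exact h4 x (List.mem_append.2 (Or.inl hx))
      · intro x hx hxs
        by_cases hxn : x ∈ s.add n
        · have : x = n := by
            rcases (PySem.Set.mem_add s n x).1 hxn with h | h
            · exact absurd h hxs
            · exact h
          exact h4 x (List.mem_append.2 (Or.inr (this ▸ List.mem_singleton_self _)))
        · exact h5 x hx hxn
      · have hlen : (s.add n).length = s.length + 1 := by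
          rw [hadd]
          simp
        simp only [List.length_append, List.length_cons, List.length_nil] at h6
        omega

-- main BFS lemma: with enough fuel the result is sound, monotone and closed under adjacency
theorem pv_bfs_spec (adj : PySem.Dict String (PySem.Set String)) (vwe : List String)
    (P : List (String × String)) (v0 : String)
    (hadj : ∀ x y, y ∈ adj.getD x PySem.Set.empty ↔ pvAdjRel P x y)
    (hend : ∀ p ∈ P, p.1 ∈ vwe ∧ p.2 ∈ vwe) (hvwe : vwe.Nodup) :
    ∀ (fuel : Nat) (visited : PySem.Set String) (queue : List String),
      visited.Nodup → (∀ x ∈ queue, x ∈ visited) → (∀ x ∈ visited, x ∈ vwe) →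
      (∀ x ∈ visited, pvReach P v0 x) →
      (∀ x ∈ visited, x ∉ queue → ∀ y, pvAdjRel P x y → y ∈ visited) →
      queue.length + 2 * (vwe.length - visited.length) ≤ fuel →
      (∀ x ∈ visited, x ∈ pvBfs adj fuel visited queue) ∧
      (∀ x ∈ pvBfs adj fuel visited queue, x ∈ vwe ∧ pvReach P v0 x) ∧
      (∀ x ∈ pvBfs adj fuel visited queue, ∀ y, pvAdjRel P x y → y ∈ pvBfs adj fuel visited queue) := by
  intro fuel
  induction fuel with
  | zero =>
    intro visited queue hnd hq hvw hr hcl hm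
    have hq0 : queue = [] := by
      cases queue with
      | nil => rfl
      | cons a t => simp at hm
    subst hq0
    exact ⟨fun x h => h, fun x h => ⟨hvw x h, hr x h⟩,
      fun x hx y hxy => hcl x hx (by simp) y hxy⟩
  | succ fuel ih =>
    intro visited queue hnd hq hvw hr hcl hm
    cases queue with
    | nil =>
      exact ⟨fun x h => h, fun x h => ⟨hvw x h, hr x h⟩,
        fun x hx y hxy => hcl x hx (by simp) y hxy⟩
    | cons node q =>
      have hunf : pvBfs adj (fuel + 1) visited (node :: q) =
          pvBfs adj fuel ((adj.getD node PySem.Set.empty).foldl pvInnerStep (visited, q)).1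
            ((adj.getD node PySem.Set.empty).foldl pvInnerStep (visited, q)).2 := rfl
      rw [hunf]
      obtain ⟨h1, h2, h3, h4, h5, h6⟩ := pv_bfsInner (adj.getD node PySem.Set.empty) visited q hnd
      have hnode : node ∈ visited := hq node List.mem_cons_self
      have hsub1 : ∀ x ∈ visited, x ∈ ((adj.getD node PySem.Set.empty).foldl pvInnerStep (visited, q)).1 :=
        fun x hx => (h1 x).2 (Or.inl hx)
      have hns : ∀ x ∈ adj.getD node PySem.Set.empty, pvAdjRel P node x :=
        fun x hx => (hadj node x).1 hx
      have hvw' : ∀ x ∈ ((adj.getD node PySem.Set.empty).foldl pvInnerStep (visited, q)).1, x ∈ vwe := by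
        intro x hx
        rcases (h1 x).1 hx with h | h
        · exact hvw x h
        · rcases hns x h with h' | h'
          · exact (hend _ h').2
          · exact (hend _ h').1
      have hr' : ∀ x ∈ ((adj.getD node PySem.Set.empty).foldl pvInnerStep (visited, q)).1, pvReach P v0 x := by
        intro x hx
        rcases (h1 x).1 hx with h | h
        · exact hr x h
        · exact pvReach.step (hr node hnode) (hns x h)
      have hq' : ∀ x ∈ ((adj.getD node PySem.Set.empty).foldl pvInnerStep (visited, q)).2,
          x ∈ ((adj.getD node PySem.Set.empty).foldl pvInnerStep (visited, q)).1 := by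
        intro x hx
        rcases h3 x hx with h | h
        · exact hsub1 x (hq x (List.mem_cons_of_mem _ h))
        · exact (h1 x).2 (Or.inr h)
      have hcl' : ∀ x ∈ ((adj.getD node PySem.Set.empty).foldl pvInnerStep (visited, q)).1,
          x ∉ ((adj.getD node PySem.Set.empty).foldl pvInnerStep (visited, q)).2 →
          ∀ y, pvAdjRel P x y → y ∈ ((adj.getD node PySem.Set.empty).foldl pvInnerStep (visited, q)).1 := by
        intro x hx hxq y hxy
        by_cases hxv : x ∈ visited
        · by_cases hxn : x = node
          · subst hxn
            exact (h1 y).2 (Or.inr ((hadj x y).2 hxy))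
          · have hxq0 : x ∉ node :: q := by
              intro hmem
              rcases List.mem_cons.1 hmem with h | h
              · exact hxn h
              · exact hxq (h4 x h)
            exact hsub1 y (hcl x hxv hxq0 y hxy)
        · exact absurd (h5 x hx hxv) hxq
      have hlen1 : visited.length ≤ ((adj.getD node PySem.Set.empty).foldl pvInnerStep (visited, q)).1.length :=
        pvLenLe hnd (fun a ha => (h1 a).2 (Or.inl ha)) h2
      have hlenV : ((adj.getD node PySem.Set.empty).foldl pvInnerStep (visited, q)).1.length ≤ vwe.length :=
        pvLenLe h2 (fun a ha => hvw' a ha) hvwe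
      have hlenW : visited.length ≤ vwe.length := pvLenLe hnd (fun a ha => hvw a ha) hvwe
      have hm' : ((adj.getD node PySem.Set.empty).foldl pvInnerStep (visited, q)).2.length +
          2 * (vwe.length - ((adj.getD node PySem.Set.empty).foldl pvInnerStep (visited, q)).1.length) ≤ fuel := by
        simp only [List.length_cons] at hm
        omega
      obtain ⟨ih1, ih2, ih3⟩ := ih _ _ h2 hq' hvw' hr' hcl' hm'
      exact ⟨fun x hx => ih1 x (hsub1 x hx), ih2, ih3⟩

-- a set containing v0 and closed under the edge relation contains everything reachable
theorem pv_reach_mem {P : List (String × String)} {R : List String} {v0 : String}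
    (hv : v0 ∈ R) (hc : ∀ x ∈ R, ∀ y, pvAdjRel P x y → y ∈ R) :
    ∀ x, pvReach P v0 x → x ∈ R := by
  intro x hx
  induction hx with
  | refl => exact hv
  | step h hadj ih => exact hc _ ih _ hadj

-- one edge relaxation only appends
theorem pv_passStep_append (r : PySem.Set String) (p : String × String) :
    ∃ t, pvPassStep r p = r ++ t := by
  have hadd : ∀ (s : PySem.Set String) (a : String), ∃ t, s.add a = s ++ t := by
    intro s a
    simp only [PySem.Set.add]
    split_ifs
    · exact ⟨[], by simp⟩
    · exact ⟨[a], rfl⟩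
  simp only [pvPassStep]
  split_ifs
  · obtain ⟨t1, h1⟩ := hadd r p.2
    obtain ⟨t2, h2⟩ := hadd (r.add p.2) p.1
    exact ⟨t1 ++ t2, by rw [h2, h1, List.append_assoc]⟩
  · exact hadd r p.2
  · exact hadd r p.1
  · exact ⟨[], by simp⟩

theorem pv_passStep_mono (r : PySem.Set String) (p : String × String) :
    ∀ x ∈ r, x ∈ pvPassStep r p := by
  obtain ⟨t, ht⟩ := pv_passStep_append r p
  intro x hx
  rw [ht]
  exact List.mem_append.2 (Or.inl hx)

theorem pv_pass_append (l : List (String × String)) (r : PySem.Set String) :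
    ∃ t, l.foldl pvPassStep r = r ++ t := by
  induction l generalizing r with
  | nil => exact ⟨[], by simp⟩
  | cons p l ih =>
    obtain ⟨t1, h1⟩ := pv_passStep_append r p
    obtain ⟨t2, h2⟩ := ih (pvPassStep r p)
    refine ⟨t1 ++ t2, ?_⟩
    rw [List.foldl_cons, h2, h1, List.append_assoc]

theorem pv_pass_mono (l : List (String × String)) (r : PySem.Set String) :
    ∀ x ∈ r, x ∈ l.foldl pvPassStep r := by
  obtain ⟨t, ht⟩ := pv_pass_append l r
  intro x hx
  rw [ht]
  exact List.mem_append.2 (Or.inl hx)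

theorem pv_passStep_nodup (r : PySem.Set String) (p : String × String) (h : r.Nodup) :
    (pvPassStep r p).Nodup := by
  simp only [pvPassStep]
  split_ifs <;>
    first
    | exact h
    | exact PySem.Set.nodup_add _ _ h
    | exact PySem.Set.nodup_add _ _ (PySem.Set.nodup_add _ _ h)

theorem pv_pass_nodup (l : List (String × String)) (r : PySem.Set String) (h : r.Nodup) :
    (l.foldl pvPassStep r).Nodup := by
  induction l generalizing r with
  | nil => exact h
  | cons p l ih => exact ih _ (pv_passStep_nodup r p h)

theorem pv_passStep_sound (P : List (String × String)) (v0 : String) (p : String × String)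
    (hp : p ∈ P) (r : PySem.Set String) (hr : ∀ x ∈ r, pvReach P v0 x) :
    ∀ x ∈ pvPassStep r p, pvReach P v0 x := by
  have hadd : ∀ (s : PySem.Set String) (a : String), (∀ x ∈ s, pvReach P v0 x) →
      pvReach P v0 a → ∀ x ∈ s.add a, pvReach P v0 x := by
    intro s a hsr ha x hx
    rcases (PySem.Set.mem_add s a x).1 hx with h | h
    · exact hsr x h
    · exact h ▸ ha
  have hp1 : (p.1, p.2) ∈ P := by simpa using hp
  simp only [pvPassStep]
  split_ifs with h1 h2 h3
  · have hr1 : ∀ x ∈ r.add p.2, pvReach P v0 x :=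
      hadd r p.2 hr (pvReach.step (hr p.1 ((pv_mem_contains r p.1).1 h1)) (Or.inl hp1))
    exact hadd _ p.1 hr1 (hr p.1 ((pv_mem_contains r p.1).1 h1))
  · exact hadd r p.2 hr (pvReach.step (hr p.1 ((pv_mem_contains r p.1).1 h1)) (Or.inl hp1))
  · exact hadd r p.1 hr (pvReach.step (hr p.2 ((pv_mem_contains r p.2).1 h3)) (Or.inr hp1))
  · exact hr

theorem pv_pass_sound (l : List (String × String)) (P : List (String × String)) (v0 : String)
    (hl : ∀ p ∈ l, p ∈ P) (r : PySem.Set String) (hr : ∀ x ∈ r, pvReach P v0 x) :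
    ∀ x ∈ l.foldl pvPassStep r, pvReach P v0 x := by
  induction l generalizing r with
  | nil => exact hr
  | cons p l ih =>
    exact ih (fun q hq => hl q (List.mem_cons_of_mem _ hq)) _
      (pv_passStep_sound P v0 p (hl p List.mem_cons_self) r hr)

theorem pv_passStep_sub (V : List String) (p : String × String)
    (hpe : p.1 ∈ V ∧ p.2 ∈ V) (r : PySem.Set String) (hr : ∀ x ∈ r, x ∈ V) :
    ∀ x ∈ pvPassStep r p, x ∈ V := by
  have hadd : ∀ (s : PySem.Set String) (a : String), (∀ x ∈ s, x ∈ V) → a ∈ V →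
      ∀ x ∈ s.add a, x ∈ V := by
    intro s a hsr ha x hx
    rcases (PySem.Set.mem_add s a x).1 hx with h | h
    · exact hsr x h
    · exact h ▸ ha
  simp only [pvPassStep]
  split_ifs
  · exact hadd _ p.1 (hadd r p.2 hr hpe.2) hpe.1
  · exact hadd r p.2 hr hpe.2
  · exact hadd r p.1 hr hpe.1
  · exact hr

theorem pv_pass_sub (l : List (String × String)) (V : List String)
    (hend : ∀ p ∈ l, p.1 ∈ V ∧ p.2 ∈ V) (r : PySem.Set String) (hr : ∀ x ∈ r, x ∈ V) :
    ∀ x ∈ l.foldl pvPassStep r, x ∈ V := by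
  induction l generalizing r with
  | nil => exact hr
  | cons p l ih =>
    exact ih (fun q hq => hend q (List.mem_cons_of_mem _ hq)) _
      (pv_passStep_sub V p (hend p List.mem_cons_self) r hr)

theorem pv_passStep_hit1 (r : PySem.Set String) (p : String × String) (h : p.1 ∈ r) :
    p.2 ∈ pvPassStep r p := by
  simp only [pvPassStep]
  rw [if_pos ((pv_mem_contains r p.1).2 h)]
  split_ifs
  · exact (PySem.Set.mem_add _ _ _).2 (Or.inl ((PySem.Set.mem_add _ _ _).2 (Or.inr rfl)))
  · exact (PySem.Set.mem_add _ _ _).2 (Or.inr rfl)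

theorem pv_passStep_hit2 (r : PySem.Set String) (p : String × String) (h : p.2 ∈ r) :
    p.1 ∈ pvPassStep r p := by
  simp only [pvPassStep]
  split_ifs with h1 h2 h3
  · exact (PySem.Set.mem_add _ _ _).2 (Or.inr rfl)
  · exact absurd ((pv_mem_contains _ p.2).2 ((PySem.Set.mem_add _ _ _).2 (Or.inl h))) h2
  · exact (PySem.Set.mem_add _ _ _).2 (Or.inr rfl)
  · exact absurd ((pv_mem_contains r p.2).2 h) h3

theorem pv_pass_hit1 (l : List (String × String)) (r : PySem.Set String) (p : String × String)
    (hp : p ∈ l) (h1 : p.1 ∈ r) : p.2 ∈ l.foldl pvPassStep r := by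
  induction l generalizing r with
  | nil => exact absurd hp (List.not_mem_nil)
  | cons q l ih =>
    rcases List.mem_cons.1 hp with h | h
    · subst h
      exact pv_pass_mono l _ _ (pv_passStep_hit1 r p h1)
    · exact ih _ h (pv_passStep_mono r q _ h1)

theorem pv_pass_hit2 (l : List (String × String)) (r : PySem.Set String) (p : String × String)
    (hp : p ∈ l) (h2 : p.2 ∈ r) : p.1 ∈ l.foldl pvPassStep r := by
  induction l generalizing r with
  | nil => exact absurd hp (List.not_mem_nil)
  | cons q l ih =>
    rcases List.mem_cons.1 hp with h | h
    · subst h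
      exact pv_pass_mono l _ _ (pv_passStep_hit2 r p h2)
    · exact ih _ h (pv_passStep_mono r q _ h2)

theorem pv_rangeFoldl_eq_iterate {α : Type} (f : α → α) (k : Nat) (a : α) :
    (List.range k).foldl (fun r _ => f r) a = f^[k] a := by
  induction k with
  | zero => rfl
  | succ k ih => simp [List.range_succ, List.foldl_append, ih, Function.iterate_succ_apply']

theorem pv_iter_stable {α : Type} (f : α → α) (r : α) (h : f r = r) : ∀ m, f^[m] r = r := by
  intro m
  induction m with
  | zero => rfl
  | succ m ih => rw [Function.iterate_succ_apply', ih, h]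

theorem pv_iter_grow (f : PySem.Set String → PySem.Set String)
    (hmono : ∀ r, ∃ t, f r = r ++ t) (r0 : PySem.Set String) :
    ∀ k, (∀ j, j < k → f (f^[j] r0) ≠ f^[j] r0) → k + r0.length ≤ (f^[k] r0).length := by
  intro k
  induction k with
  | zero => simp
  | succ k ih =>
    intro h
    have hk := ih (fun j hj => h j (Nat.lt_succ_of_lt hj))
    have hne := h k (Nat.lt_succ_self k)
    obtain ⟨t, ht⟩ := hmono (f^[k] r0)
    have htne : t ≠ [] := by
      intro h0
      exact hne (by rw [ht, h0, List.append_nil])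
    have htl : 1 ≤ t.length := List.length_pos_iff.2 htne
    rw [Function.iterate_succ_apply', ht, List.length_append]
    omega

-- after |V| passes the reached set is a fixpoint of the pass
theorem pv_iter_fix (P : List (String × String)) (V : List String) (hV : V.Nodup)
    (r0 : PySem.Set String) (h0 : r0.length = 1)
    (hsub : ∀ m, ∀ x ∈ (fun r => P.foldl pvPassStep r)^[m] r0, x ∈ V)
    (hnd : ∀ m, ((fun r => P.foldl pvPassStep r)^[m] r0).Nodup) :
    P.foldl pvPassStep ((fun r => P.foldl pvPassStep r)^[V.length] r0) =
      (fun r => P.foldl pvPassStep r)^[V.length] r0 := by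
  set f : PySem.Set String → PySem.Set String := fun r => P.foldl pvPassStep r with hf
  by_cases hex : ∃ j, j < V.length ∧ f (f^[j] r0) = f^[j] r0
  · obtain ⟨j, hj, hfix⟩ := hex
    have hst : ∀ m, f^[m] (f^[j] r0) = f^[j] r0 := pv_iter_stable f _ hfix
    have hVj : f^[V.length] r0 = f^[j] r0 := by
      have : V.length = (V.length - j) + j := by omega
      rw [this, Function.iterate_add_apply, hst]
    rw [hVj]
    exact hfix
  · exfalso
    have hne : ∀ j, j < V.length → f (f^[j] r0) ≠ f^[j] r0 :=
      fun j hj h => hex ⟨j, hj, h⟩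
    have hgrow := pv_iter_grow f (fun r => pv_pass_append P r) r0 V.length hne
    have hle : (f^[V.length] r0).length ≤ V.length :=
      pvLenLe (hnd V.length) (fun a ha => hsub V.length a ha) hV
    omega

-- the iterate keeps the basic invariants
theorem pv_iter_inv (P : List (String × String)) (V : List String) (v0 : String)
    (hend : ∀ p ∈ P, p.1 ∈ V ∧ p.2 ∈ V) (hv0 : v0 ∈ V) :
    ∀ m, ((fun r => P.foldl pvPassStep r)^[m] [v0]).Nodup ∧
      (∀ x ∈ (fun r => P.foldl pvPassStep r)^[m] [v0], x ∈ V) ∧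
      (∀ x ∈ (fun r => P.foldl pvPassStep r)^[m] [v0], pvReach P v0 x) ∧
      v0 ∈ (fun r => P.foldl pvPassStep r)^[m] [v0] := by
  intro m
  induction m with
  | zero =>
    refine ⟨List.nodup_singleton _, ?_, ?_, List.mem_singleton_self _⟩
    · intro x hx
      rw [List.mem_singleton.1 hx]
      exact hv0
    · intro x hx
      rw [List.mem_singleton.1 hx]
      exact pvReach.refl
  | succ m ih =>
    obtain ⟨ihn, ihs, ihr, ihv⟩ := ih
    rw [Function.iterate_succ_apply']
    exact ⟨pv_pass_nodup P _ ihn, pv_pass_sub P V hend _ ihs,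
      pv_pass_sound P P v0 (fun p hp => hp) _ ihr, pv_pass_mono P _ v0 ihv⟩

-- ===== VERDICT (by name: the statement is the Claim_ definition above) =====
theorem mixed_connectivity_ok_py_spec : Claim_equal_mixed_connectivity_ok_py := by
  intro nodes edges _ _
  unfold Spec_mixed_connectivity_ok_py
  have hA2 := pv_adjFold_snd edges PySem.Dict.empty PySem.Set.empty
  simp only [mixed_connectivity_ok_py, mixed_connectivity_ok_py_alt, hA2]
  have hVnd := pv_nodup_vertsFold (pvPairs edges) PySem.Set.empty List.nodup_nil
  have hVmem := fun x => pv_mem_vertsFold (pvPairs edges) PySem.Set.empty x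
  have hadjmem := fun x y => pv_adjFold_fst_mem edges PySem.Dict.empty PySem.Set.empty x y
  generalize hV : (pvPairs edges).foldl (fun (s : PySem.Set String) p => (s.add p.1).add p.2) PySem.Set.empty = V at *
  cases V with
  | nil => rfl
  | cons v0 rest =>
    show PySem.Set.equal
        (pvBfs (edges.foldl pvAdjStep (PySem.Dict.empty, PySem.Set.empty)).1
          (1 + 2 * (v0 :: rest).length) (PySem.Set.ofList [v0]) [v0])
        (v0 :: rest) =
      (((List.range (v0 :: rest).length).foldl
          (fun r _ => (pvPairs edges).foldl pvPassStep r) (PySem.Set.ofList [v0])).length ==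
        (v0 :: rest).length)
    set P := pvPairs edges with hP
    set V := v0 :: rest with hVd
    have hVmem' : ∀ x, x ∈ V ↔ ∃ p ∈ P, x = p.1 ∨ x = p.2 := by
      intro x
      rw [hVmem x]
      simp [PySem.Set.empty]
    have hend : ∀ p ∈ P, p.1 ∈ V ∧ p.2 ∈ V :=
      fun p hp => ⟨(hVmem' p.1).2 ⟨p, hp, Or.inl rfl⟩, (hVmem' p.2).2 ⟨p, hp, Or.inr rfl⟩⟩
    have hv0 : v0 ∈ V := by
      rw [hVd]
      exact List.mem_cons_self
    have hadj : ∀ x y, y ∈ (edges.foldl pvAdjStep (PySem.Dict.empty, PySem.Set.empty)).1.getD x PySem.Set.empty ↔ pvAdjRel P x y := by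
      intro x y
      rw [hadjmem x y]
      have hemp : (PySem.Dict.empty : PySem.Dict String (PySem.Set String)).getD x PySem.Set.empty = PySem.Set.empty := rfl
      rw [hemp]
      simp [PySem.Set.empty]
    have hone : PySem.Set.ofList [v0] = [v0] := rfl
    rw [hone]
    -- A side: BFS characterisation
    obtain ⟨hb1, hb2, hb3⟩ := pv_bfs_spec (edges.foldl pvAdjStep (PySem.Dict.empty, PySem.Set.empty)).1
      V P v0 hadj hend hVnd (1 + 2 * V.length) [v0] [v0]
      (List.nodup_singleton _) (fun x hx => hx)
      (fun x hx => (List.mem_singleton.1 hx) ▸ hv0)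
      (fun x hx => (List.mem_singleton.1 hx) ▸ pvReach.refl)
      (fun x hx hnx => absurd hx hnx)
      (by simp only [List.length_singleton]; omega)
    set R := pvBfs (edges.foldl pvAdjStep (PySem.Dict.empty, PySem.Set.empty)).1
      (1 + 2 * V.length) [v0] [v0] with hR
    have hRchar : ∀ x, x ∈ R ↔ pvReach P v0 x :=
      fun x => ⟨fun h => (hb2 x h).2,
        fun h => pv_reach_mem (hb1 v0 (by simp)) hb3 x h⟩
    have hAiff : PySem.Set.equal R V = true ↔ ∀ x ∈ V, pvReach P v0 x := by
      rw [PySem.Set.equal_iff]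
      constructor
      · intro h x hx
        exact (hRchar x).1 ((h x).2 hx)
      · intro h x
        exact ⟨fun hx => (hb2 x hx).1, fun hx => (hRchar x).2 (h x hx)⟩
    -- B side: iterate characterisation
    rw [pv_rangeFoldl_eq_iterate]
    have hinv := pv_iter_inv P V v0 hend hv0
    set R' := (fun r => P.foldl pvPassStep r)^[V.length] [v0] with hR'
    obtain ⟨hR'nd, hR'sub, hR'snd, hR'v0⟩ := hinv V.length
    have hfix : P.foldl pvPassStep R' = R' :=
      pv_iter_fix P V hVnd [v0] rfl (fun m x hx => (hinv m).2.1 x hx) (fun m => (hinv m).1)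
    have hclosed : ∀ x ∈ R', ∀ y, pvAdjRel P x y → y ∈ R' := by
      intro x hx y hxy
      rcases hxy with h | h
      · exact hfix ▸ pv_pass_hit1 P R' (x, y) h hx
      · exact hfix ▸ pv_pass_hit2 P R' (y, x) h hx
    have hR'char : ∀ x, x ∈ R' ↔ pvReach P v0 x :=
      fun x => ⟨fun h => hR'snd x h, fun h => pv_reach_mem hR'v0 hclosed x h⟩
    have hBiff : ((R'.length == V.length) = true) ↔ ∀ x ∈ V, pvReach P v0 x := by
      rw [beq_iff_eq]
      constructor
      · intro h x hx
        exact (hR'char x).1 (pvSubsetFull (fun a ha => hR'sub a ha) hR'nd hVnd h.ge x hx)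
      · intro h
        have hsup : ∀ x ∈ V, x ∈ R' := fun x hx => (hR'char x).2 (h x hx)
        exact Nat.le_antisymm (pvLenLe hR'nd (fun a ha => hR'sub a ha) hVnd)
          (pvLenLe hVnd (fun a ha => hsup a ha) hR'nd)
    exact pvBoolEq (hAiff.trans hBiff.symm)
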